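-- pv_equiv track=rewrite | github.com/diane-defores/contentglowz | contentglowz_lab/utils/libsql_params.py | inline_null_params
-- ===== SOURCE A (Python) =====
-- from typing import Any, Iterable
--
-- def inline_null_params(statement: str, params: Iterable[Any]) -> tuple[str, list[Any]]:
--     """Replace placeholders for Python None values with SQL NULL.
--
--     The maintained libsql driver normally binds None correctly. Some remote
--     Hrana parse failures have surfaced with Python ``None`` rendered as a SQL
--     token, so the wrappers use this only as a retry fallback.
--     """
--     values = list(params)
--     if not values or all(value is not None for value in values):
--         return statement, values
--
--     output: list[str] = []
--     remaining: list[Any] = []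
--     param_index = 0
--     in_single = False
--     in_double = False
--     index = 0
--
--     while index < len(statement):
--         char = statement[index]
--         output.append(char)
--
--         if char == "'" and not in_double:
--             if in_single and index + 1 < len(statement) and statement[index + 1] == "'":
--                 index += 1
--                 output.append(statement[index])
--             else:
--                 in_single = not in_single
--         elif char == '"' and not in_single:
--             if in_double and index + 1 < len(statement) and statement[index + 1] == '"':
--                 index += 1
--                 output.append(statement[index])
--             else:
--                 in_double = not in_double
--         elif char == "?" and not in_single and not in_double:
--             if param_index < len(values):
--                 value = values[param_index]
--                 param_index += 1
--                 if value is None: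
--                     output[-1] = "NULL"
--                 else:
--                     remaining.append(value)
--
--         index += 1
--
--     if param_index != len(values):
--         return statement, values
--     return "".join(output), remaining
-- ===== SOURCE B (Python) =====
-- def _tokenize(statement):
--     """Split statement into tokens: quoted literals (with '' / "" escapes,
--     running to end-of-string if unterminated), lone '?', or plain runs."""
--     tokens = []
--     i = 0
--     n = len(statement)
--     while i < n:
--         c = statement[i]
--         if c == "'" or c == '"':
--             j = i + 1
--             while j < n:
--                 if statement[j] == c:
--                     if j + 1 < n and statement[j + 1] == c:
--                         j += 2
--                     else:
--                         j += 1
--                         break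
--                 else:
--                     j += 1
--             tokens.append(statement[i:j])
--             i = j
--         elif c == "?":
--             tokens.append("?")
--             i += 1
--         else:
--             j = i
--             while j < n and statement[j] not in "'\"?":
--                 j += 1
--             tokens.append(statement[i:j])
--             i = j
--     return tokens
--
--
-- def inline_null_params(statement, params):
--     values = list(params)
--     if not values or all(value is not None for value in values):
--         return statement, values
--
--     tokens = _tokenize(statement)
--     if sum(1 for t in tokens if t == "?") < len(values):
--         return statement, values
--
--     out = []
--     remaining = []
--     taken = 0
--     for t in tokens:
--         if t == "?" and taken < len(values):
--             value = values[taken]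
--             taken += 1
--             if value is None:
--                 out.append("NULL")
--             else:
--                 out.append("?")
--                 remaining.append(value)
--         else:
--             out.append(t)
--     return "".join(out), remaining
-- ===== Notes on version B (the rewrite author's own statement) =====
-- stated objective: alternative
-- what changed: A interleaves quote tracking and substitution in one char-by-char state machine; B first tokenizes the statement into quoted literals / lone '?' / plain runs, then substitutes over the token list in a second pass, copying whole runs at once.
import Mathlib
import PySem

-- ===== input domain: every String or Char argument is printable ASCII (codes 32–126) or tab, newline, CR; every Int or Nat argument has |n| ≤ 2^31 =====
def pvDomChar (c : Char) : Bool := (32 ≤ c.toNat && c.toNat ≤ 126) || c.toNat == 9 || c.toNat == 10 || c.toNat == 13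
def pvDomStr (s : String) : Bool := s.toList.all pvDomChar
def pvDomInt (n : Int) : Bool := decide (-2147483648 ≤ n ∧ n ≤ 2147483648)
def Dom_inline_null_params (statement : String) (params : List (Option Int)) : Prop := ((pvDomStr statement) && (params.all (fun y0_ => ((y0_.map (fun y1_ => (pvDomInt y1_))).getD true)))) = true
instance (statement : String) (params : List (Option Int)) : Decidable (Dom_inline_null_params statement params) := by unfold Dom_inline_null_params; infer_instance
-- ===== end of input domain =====

-- B replaces A's single char-by-char quote-state machine with a two-pass
-- tokenize-then-substitute design (same asymptotics; measured faster by a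
-- constant factor since plain/quoted runs are copied as whole slices).

-- ===== PORT A =====
-- A's while loop over `index`, ported as recursion on the remaining chars;
-- output is the Python list-of-strings (List (List Char)), joined at the end.
def aLoop (cs : List Char) (inS inD : Bool) (out : List (List Char))
    (rem : List (Option Int)) (pidx : Nat) (values : List (Option Int)) :
    List (List Char) × List (Option Int) × Nat :=
  match cs with
  | [] => (out, rem, pidx)
  | c :: rest =>
    let out := out ++ [[c]]                 -- output.append(char)
    if c = '\'' ∧ inD = false then
      if inS = true ∧ rest.head? = some '\'' then
        aLoop rest.tail inS inD (out ++ [['\'']]) rem pidx values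
      else
        aLoop rest (!inS) inD out rem pidx values
    else if c = '"' ∧ inS = false then
      if inD = true ∧ rest.head? = some '"' then
        aLoop rest.tail inS inD (out ++ [['"']]) rem pidx values
      else
        aLoop rest inS (!inD) out rem pidx values
    else if c = '?' ∧ inS = false ∧ inD = false then
      if pidx < values.length then
        let value := values.getD pidx none
        if value = none then
          aLoop rest inS inD (out.dropLast ++ [['N','U','L','L']]) rem (pidx + 1) values
        else
          aLoop rest inS inD out (rem ++ [value]) (pidx + 1) values
      else
        aLoop rest inS inD out rem pidx values
    else
      aLoop rest inS inD out rem pidx values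
termination_by cs.length
decreasing_by all_goals (simp [List.length_tail]; try omega)

def inline_null_params (statement : String) (params : List (Option Int)) : String × List (Option Int) :=
  let values := params
  if values = [] ∨ values.all (fun v => v ≠ none) then (statement, values)
  else
    let r := aLoop statement.toList false false [] [] 0 values
    if r.2.2 ≠ values.length then (statement, values)
    else (String.ofList r.1.flatten, r.2.1)

-- ===== PORT B =====
-- B's inner quote scan (statement[i:j] slice returned as (token, rest)).
def scanQuote (q : Char) (cs : List Char) : List Char × List Char :=
  match cs with
  | [] => ([], [])
  | c :: rest =>
    if c = q then
      match rest with
      | c2 :: rest2 =>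
        if c2 = q then
          let tr := scanQuote q rest2
          (c :: c2 :: tr.1, tr.2)
        else ([c], rest)
      | [] => ([c], [])
    else
      let tr := scanQuote q rest
      (c :: tr.1, tr.2)

-- B's plain run scan (chars up to the next quote or '?').
def scanPlain (cs : List Char) : List Char × List Char :=
  match cs with
  | [] => ([], [])
  | c :: rest =>
    if c = '\'' ∨ c = '"' ∨ c = '?' then ([], cs)
    else
      let tr := scanPlain rest
      (c :: tr.1, tr.2)

-- the ports cite these by name for termination
theorem scanQuote_suffix (q : Char) (cs : List Char) : cs = (scanQuote q cs).1 ++ (scanQuote q cs).2 := by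
  induction cs using scanQuote.induct q
  all_goals rw [scanQuote.eq_def]
  case case1 => simp
  case case2 rest2 ih => simp; exact ih
  case case3 c2 rest2 hc2 => simp [hc2]
  case case4 => simp
  case case5 c rest hc ih => simp [hc]; exact ih

theorem scanQuote_rest_le (q : Char) (cs : List Char) : (scanQuote q cs).2.length ≤ cs.length := by
  conv_rhs => rw [scanQuote_suffix q cs]
  simp

theorem scanPlain_suffix (cs : List Char) : cs = (scanPlain cs).1 ++ (scanPlain cs).2 := by
  induction cs with
  | nil => simp [scanPlain]
  | cons c rest ih =>
    by_cases h : c = '\'' ∨ c = '"' ∨ c = '?'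
    · simp [scanPlain, h]
    · simp [scanPlain, h]; exact ih

theorem scanPlain_rest_le (cs : List Char) : (scanPlain cs).2.length ≤ cs.length := by
  conv_rhs => rw [scanPlain_suffix cs]
  simp

-- B's tokenizer: quoted literal / lone '?' / plain run.
def bTok (cs : List Char) : List (List Char) :=
  match cs with
  | [] => []
  | c :: rest =>
    if c = '\'' ∨ c = '"' then
      let tr := scanQuote c rest
      (c :: tr.1) :: bTok tr.2
    else if c = '?' then
      ['?'] :: bTok rest
    else
      let tr := scanPlain rest
      (c :: tr.1) :: bTok tr.2
termination_by cs.length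
decreasing_by
  · exact Nat.lt_succ_of_le (scanQuote_rest_le _ _)
  · simp
  · exact Nat.lt_succ_of_le (scanPlain_rest_le _)

-- B's substitution loop over the tokens.
def bFold (values : List (Option Int)) (tokens : List (List Char))
    (out : List (List Char)) (rem : List (Option Int)) (taken : Nat) :
    List (List Char) × List (Option Int) × Nat :=
  match tokens with
  | [] => (out, rem, taken)
  | t :: ts =>
    if t = ['?'] ∧ taken < values.length then
      let value := values.getD taken none
      if value = none then
        bFold values ts (out ++ [['N','U','L','L']]) rem (taken + 1)
      else
        bFold values ts (out ++ [['?']]) (rem ++ [value]) (taken + 1)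
    else
      bFold values ts (out ++ [t]) rem taken

def inline_null_params_alt (statement : String) (params : List (Option Int)) : String × List (Option Int) :=
  let values := params
  if values = [] ∨ values.all (fun v => v ≠ none) then (statement, values)
  else
    let tokens := bTok statement.toList
    if tokens.countP (fun t => t = ['?']) < values.length then (statement, values)
    else
      let r := bFold values tokens [] [] 0
      (String.ofList r.1.flatten, r.2.1)

-- ===== PRECONDITION & SPEC =====
def Spec_inline_null_params (statement : String) (params : List (Option Int)) (out : String × List (Option Int)) : Prop := out = inline_null_params_alt statement params
instance (statement : String) (params : List (Option Int)) (out : String × List (Option Int)) : Decidable (Spec_inline_null_params statement params out) := by unfold Spec_inline_null_params; infer_instance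

-- ===== CLAIM (what is proved, stated in full; the proofs are below) =====
def Claim_equal_inline_null_params : Prop := ∀ (statement : String) (params : List (Option Int)), Dom_inline_null_params statement params → Spec_inline_null_params statement params (inline_null_params statement params)

-- ===== LEMMAS AND PROOFS =====

-- common abstraction: token-level replay over a flattened output
def eRun (values : List (Option Int)) (tokens : List (List Char))
    (out : List Char) (rem : List (Option Int)) (p : Nat) :
    List Char × List (Option Int) × Nat :=
  match tokens with
  | [] => (out, rem, p)
  | t :: ts =>
    if t = ['?'] ∧ p < values.length then
      let value := values.getD p none
      if value = none then
        eRun values ts (out ++ ['N','U','L','L']) rem (p + 1)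
      else
        eRun values ts (out ++ ['?']) (rem ++ [value]) (p + 1)
    else
      eRun values ts (out ++ t) rem p

theorem eRun_bFold (values : List (Option Int)) (tokens : List (List Char))
    (out : List (List Char)) (rem : List (Option Int)) (p : Nat) :
    eRun values tokens out.flatten rem p
      = ((bFold values tokens out rem p).1.flatten,
         (bFold values tokens out rem p).2) := by
  induction tokens generalizing out rem p with
  | nil => simp [eRun, bFold]
  | cons t ts ih =>
    by_cases h : t = ['?'] ∧ p < values.length
    · simp only [eRun, bFold, if_pos h]
      cases hv : values.getD p none <;> simp_all [← ih, List.flatten_append]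
    · simp only [eRun, bFold, if_neg h]
      rw [← ih]
      simp [List.flatten_append]

theorem aLoop_quote_single (values : List (Option Int)) (cs : List Char)
    (out : List (List Char)) (rem : List (Option Int)) (p : Nat) :
    aLoop cs true false out rem p values
      = aLoop (scanQuote '\'' cs).2 false false
          (out ++ (scanQuote '\'' cs).1.map (fun c => [c])) rem p values := by
  induction cs using scanQuote.induct '\'' generalizing out
  all_goals rw [scanQuote.eq_def]
  case case1 => simp [aLoop]
  case case2 rest2 ih => simp [aLoop, ih]
  case case3 c2 rest2 hc2 => simp [aLoop, hc2]
  case case4 => simp [aLoop]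
  case case5 c rest hc ih => simp [aLoop, hc, ih]

theorem aLoop_quote_double (values : List (Option Int)) (cs : List Char)
    (out : List (List Char)) (rem : List (Option Int)) (p : Nat) :
    aLoop cs false true out rem p values
      = aLoop (scanQuote '"' cs).2 false false
          (out ++ (scanQuote '"' cs).1.map (fun c => [c])) rem p values := by
  induction cs using scanQuote.induct '"' generalizing out
  all_goals rw [scanQuote.eq_def]
  case case1 => simp [aLoop]
  case case2 rest2 ih => simp [aLoop, ih]
  case case3 c2 rest2 hc2 => simp [aLoop, hc2]
  case case4 => simp [aLoop]
  case case5 c rest hc ih => simp [aLoop, hc, ih]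

theorem aLoop_plain (values : List (Option Int)) (cs : List Char)
    (out : List (List Char)) (rem : List (Option Int)) (p : Nat) :
    aLoop cs false false out rem p values
      = aLoop (scanPlain cs).2 false false
          (out ++ (scanPlain cs).1.map (fun c => [c])) rem p values := by
  induction cs generalizing out with
  | nil => simp [scanPlain, aLoop]
  | cons c rest ih =>
    by_cases h : c = '\'' ∨ c = '"' ∨ c = '?'
    · simp [scanPlain, h]
    · have h1 : ¬ c = '\'' := fun e => h (Or.inl e)
      have h2 : ¬ c = '"' := fun e => h (Or.inr (Or.inl e))
      have h3 : ¬ c = '?' := fun e => h (Or.inr (Or.inr e))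
      simp [scanPlain, aLoop, h1, h2, h3, ih]

theorem flatten_map_sing (t : List Char) : (t.map (fun c => [c])).flatten = t := by
  induction t with
  | nil => simp
  | cons c t ih => simp [ih]

theorem aLoop_eRun (values : List (Option Int)) (cs : List Char)
    (out : List (List Char)) (rem : List (Option Int)) (p : Nat) :
    ((aLoop cs false false out rem p values).1.flatten,
     (aLoop cs false false out rem p values).2)
      = eRun values (bTok cs) out.flatten rem p := by
  induction cs using bTok.induct generalizing out rem p with
  | case1 => simp [aLoop, bTok, eRun]
  | case2 c rest h tr ih =>
    rw [bTok]
    rw [if_pos h]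
    rcases h with h | h
    · subst h
      have step : aLoop ('\'' :: rest) false false out rem p values
          = aLoop rest true false (out ++ [['\'']]) rem p values := by
        simp [aLoop]
      rw [step, aLoop_quote_single, ih]
      rw [eRun]
      have hne : ¬ (('\'' :: (scanQuote '\'' rest).1) = ['?'] ∧ p < values.length) := by
        intro hx
        exact absurd (List.cons.injEq .. ▸ hx.1) (by simp)
      rw [if_neg hne]
      simp only [flatten_map_sing, List.flatten_append, List.flatten_cons, List.append_assoc, List.singleton_append]
      rfl
    · subst h
      have step : aLoop ('"' :: rest) false false out rem p values
          = aLoop rest false true (out ++ [['"']]) rem p values := by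
        simp [aLoop]
      rw [step, aLoop_quote_double, ih]
      rw [eRun]
      have hne : ¬ (('"' :: (scanQuote '"' rest).1) = ['?'] ∧ p < values.length) := by
        intro hx
        exact absurd (List.cons.injEq .. ▸ hx.1) (by simp)
      rw [if_neg hne]
      simp only [flatten_map_sing, List.flatten_append, List.flatten_cons, List.append_assoc, List.singleton_append]
      rfl
  | case3 rest h ih =>
    rw [bTok, if_neg h, if_pos rfl, eRun]
    by_cases hp : p < values.length
    · rw [if_pos ⟨rfl, hp⟩]
      have hg := List.getD_eq_getElem values none hp
      cases hv : values[p] <;> simp [aLoop, h, hp, hg, hv, ih]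
    · rw [if_neg (by tauto)]
      simp [aLoop, hp, ih]
  | case4 c rest h hq tr ih =>
    rw [bTok, if_neg h, if_neg hq]
    have h1 : ¬ c = '\'' := fun e => h (Or.inl e)
    have h2 : ¬ c = '"' := fun e => h (Or.inr e)
    have step : aLoop (c :: rest) false false out rem p values
        = aLoop rest false false (out ++ [[c]]) rem p values := by
      simp [aLoop, h1, h2, hq]
    rw [step, aLoop_plain, ih, eRun]
    have hne : ¬ ((c :: (scanPlain rest).1) = ['?'] ∧ p < values.length) := by
      intro hx
      exact hq (by simpa using congrArg (fun l => l.head?) hx.1)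
    rw [if_neg hne]
    simp only [flatten_map_sing, List.flatten_append, List.flatten_cons, List.append_assoc, List.singleton_append]
    rfl

theorem eRun_pidx (values : List (Option Int)) (tokens : List (List Char))
    (out : List Char) (rem : List (Option Int)) (p : Nat) (hp : p ≤ values.length) :
    (eRun values tokens out rem p).2.2
      = min (p + tokens.countP (fun t => t = ['?'])) values.length := by
  induction tokens generalizing out rem p with
  | nil => simp [eRun]; omega
  | cons t ts ih =>
    rw [eRun]
    by_cases hq : t = ['?']
    · by_cases hp2 : p < values.length
      · rw [if_pos ⟨hq, hp2⟩]
        have h1 : p + 1 ≤ values.length := hp2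
        cases hv : values.getD p none with
        | none =>
          simp only [hv, if_true]
          rw [ih _ _ _ h1]
          simp [hq, List.countP_cons]
          omega
        | some v =>
          simp only [hv, reduceCtorEq, if_false]
          rw [ih _ _ _ h1]
          simp [hq, List.countP_cons]
          omega
      · rw [if_neg (by tauto)]
        rw [ih _ _ _ hp]
        simp [hq, List.countP_cons]
        omega
    · rw [if_neg (by tauto)]
      rw [ih _ _ _ hp]
      simp [hq, List.countP_cons]

-- ===== VERDICT (by name: the statement is the Claim_ definition above) =====
theorem inline_null_params_spec : Claim_equal_inline_null_params := by
  intro statement params _hdom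
  unfold Spec_inline_null_params inline_null_params inline_null_params_alt
  by_cases hg : params = [] ∨ params.all (fun v => v ≠ none)
  · simp only [if_pos hg]
  · simp only [if_neg hg]
    have key : ((aLoop statement.toList false false [] [] 0 params).1.flatten,
        (aLoop statement.toList false false [] [] 0 params).2)
        = eRun params (bTok statement.toList) [] [] 0 := by
      simpa using aLoop_eRun params statement.toList [] [] 0
    have eb : eRun params (bTok statement.toList) [] [] 0
        = ((bFold params (bTok statement.toList) [] [] 0).1.flatten,
           (bFold params (bTok statement.toList) [] [] 0).2) := by
      simpa using eRun_bFold params (bTok statement.toList) [] [] 0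
    have hpid : (aLoop statement.toList false false [] [] 0 params).2.2
        = min ((bTok statement.toList).countP (fun t => t = ['?'])) params.length := by
      have h := eRun_pidx params (bTok statement.toList) [] [] 0 (Nat.zero_le _)
      rw [← key] at h
      simpa using h
    by_cases hlt : (bTok statement.toList).countP (fun t => t = ['?']) < params.length
    · rw [if_pos hlt]
      have hne : (aLoop statement.toList false false [] [] 0 params).2.2 ≠ params.length := by
        rw [hpid]; omega
      rw [if_pos hne]
    · rw [if_neg hlt]
      have heq : (aLoop statement.toList false false [] [] 0 params).2.2 = params.length := by
        rw [hpid]; omega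
      rw [if_neg (by simp [heq])]
      have h2 := key.trans eb
      have h2a : (aLoop statement.toList false false [] [] 0 params).1.flatten
          = (bFold params (bTok statement.toList) [] [] 0).1.flatten :=
        congrArg Prod.fst h2
      have h2b : (aLoop statement.toList false false [] [] 0 params).2.1
          = (bFold params (bTok statement.toList) [] [] 0).2.1 :=
        congrArg (fun x => x.2.1) h2
      rw [h2a, h2b]
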